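-- pv_equiv track=rewrite | github.com/kasztp/Peters_Python_Playground | OITM-2023/nyelvfuggetlen/3_fordulo/traffipax_reference_solution.py | solve
-- ===== SOURCE A (Python) =====
-- DAY_SECONDS = 24*3600
--
-- def solve(times:list, k:int):
--   counts = [0] * DAY_SECONDS
--   for t in times:
--     counts[t] += 1
--
--   # mozgóablak inicializálása
--   sum = 0
--   assert k < DAY_SECONDS
--   for t in range(0, k+1):
--     sum += counts[t]
--
--   maxSum = sum
--   for t in range(1, DAY_SECONDS):
--     sum += counts[(t + k) % DAY_SECONDS] - counts[t - 1]
--     if sum > maxSum: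
--       maxSum = sum
--
--   assert 0 <= maxSum <= len(times)
--   return maxSum
-- ===== SOURCE B (Python) =====
-- DAY_SECONDS = 24*3600
--
-- def solve(times, k):
--   ts = sorted(t % DAY_SECONDS for t in times)
--   n = len(ts)
--   ext = ts + [t + DAY_SECONDS for t in ts]
--   best = 0
--   j = 0
--   for i in range(n):
--     bound = ts[i] + k
--     while j < 2 * n and ext[j] <= bound:
--       j += 1
--     if j - i > best:
--       best = j - i
--   return best
-- ===== Notes on version B (the rewrite author's own statement) =====
-- stated objective: faster
-- what changed: A builds an 86400-slot histogram and slides a window across every second of the day; B normalizes each time mod 86400, sorts, appends each time shifted by +86400 to model wraparound, and runs a single two-pointer sliding window over the events only, so the fixed day-long scan disappears.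
-- outside the precondition, e.g. on solve([86399], -2): A returns 1, B returns 0
import Mathlib
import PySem

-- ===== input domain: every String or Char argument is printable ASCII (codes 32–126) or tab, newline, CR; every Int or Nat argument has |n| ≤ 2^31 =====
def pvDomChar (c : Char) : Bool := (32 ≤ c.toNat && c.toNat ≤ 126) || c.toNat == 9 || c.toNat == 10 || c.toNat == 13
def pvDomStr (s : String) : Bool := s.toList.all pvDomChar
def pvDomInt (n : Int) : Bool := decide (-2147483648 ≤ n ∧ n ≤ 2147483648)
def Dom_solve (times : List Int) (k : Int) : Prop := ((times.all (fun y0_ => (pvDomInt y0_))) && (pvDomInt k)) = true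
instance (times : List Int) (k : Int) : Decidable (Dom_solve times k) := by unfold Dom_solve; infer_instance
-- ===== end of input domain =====

-- B replaces A's fixed 86400-second histogram + day-long sliding window by sort + a two-pointer
-- window over the events themselves (each event duplicated at +86400 for wraparound): faster,
-- because the day-long scan disappears.

-- ===== PORT A =====
-- Python list indexing `xs[i]` / `xs[i] = v` on the `counts` list, ported by hand on Array
-- (Python lists are O(1)-indexed): exact for -size ≤ i < size (reads return 0 / writes are
-- dropped outside, where Python raises IndexError — such inputs are excluded by Pre_solve).
def pvAget (a : Array Int) (i : Int) : Int :=
  if 0 ≤ i then (a[i.toNat]?).getD 0 else (a[(i + a.size).toNat]?).getD 0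

def pvAset (a : Array Int) (i : Int) (v : Int) : Array Int :=
  if 0 ≤ i then a.setIfInBounds i.toNat v else a.setIfInBounds (i + a.size).toNat v

-- `counts = [0]*86400; for t in times: counts[t] += 1`
def countsA (times : List Int) : Array Int :=
  times.foldl (fun c t => pvAset c t (pvAget c t + 1)) (Array.replicate 86400 (0:Int))

-- `sum = 0; for t in range(0, k+1): sum += counts[t]`
def initSumA (counts : Array Int) (k : Int) : Int :=
  (PySem.List.pyRange 0 (k+1) 1).foldl (fun s t => s + pvAget counts t) 0

-- `maxSum = sum; for t in range(1, 86400): sum += counts[(t+k) % 86400] - counts[t-1]; ...`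
def mainLoopA (counts : Array Int) (k s0 : Int) : Int × Int :=
  (PySem.List.pyRange 1 86400 1).foldl
      (fun (st : Int × Int) t =>
        let s := st.2 + pvAget counts (PySem.Int.mod (t + k) 86400) - pvAget counts (t - 1)
        (if s > st.1 then s else st.1, s))
      (s0, s0)

def solve (times : List Int) (k : Int) : Int :=
  (mainLoopA (countsA times) k (initSumA (countsA times) k)).1

-- ===== PORT B =====
-- the `while j < 2*n and ext[j] <= bound: j += 1` loop of Source B
def bumpJ (ext : List Int) (bound : Int) (n2 : Nat) (j : Nat) : Nat :=
  if h : j < n2 ∧ PySem.List.pyGetD ext (j : Int) 0 ≤ bound then bumpJ ext bound n2 (j+1) else j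
termination_by n2 - j
decreasing_by omega

def solve_alt (times : List Int) (k : Int) : Int :=
  let ts := PySem.List.sorted (times.map (fun t => PySem.Int.mod t 86400)) (fun x => x) false
  let n := ts.length
  let ext := ts ++ ts.map (fun t => t + 86400)
  let p := (List.range n).foldl (fun (st : Int × Nat) (i : Nat) =>
      let j := bumpJ ext (PySem.List.pyGetD ts (i : Int) 0 + k) (2*n) st.2
      (if (j : Int) - (i : Int) > st.1 then (j : Int) - (i : Int) else st.1, j)) (0, 0)
  p.1

-- ===== PRECONDITION & SPEC =====
-- Pre_solve keeps the problem's natural domain (a window of length k+1 ≥ 1 within one day):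
-- outside it A raises (IndexError for times outside [-86400, 86400), AssertionError for
-- k ≥ 86400), except for negative k, which is excluded because the "window" then has
-- nonpositive length and A's sliding sum is meaningless (e.g. A returns 1 on ([86399], -2)).
def Pre_solve (times : List Int) (k : Int) : Prop :=
  (∀ t ∈ times, -86400 ≤ t ∧ t < 86400) ∧ 0 ≤ k ∧ k < 86400
instance (times : List Int) (k : Int) : Decidable (Pre_solve times k) := by
  unfold Pre_solve; infer_instance

def pvWitness_solve : List Int × Int := ([3, 5, 5, -1, 86399], 10)

def Spec_solve (times : List Int) (k : Int) (out : Int) : Prop := out = solve_alt times k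
instance (times : List Int) (k : Int) (out : Int) : Decidable (Spec_solve times k out) := by unfold Spec_solve; infer_instance

-- ===== CLAIM (what is proved, stated in full; the proofs are below) =====
def Claim_equal_solve : Prop := ∀ (times : List Int) (k : Int), Dom_solve times k → Pre_solve times k → Spec_solve times k (solve times k)

-- ===== LEMMAS AND PROOFS =====

-- f s = number of events in the circular window [s, s+k]  (the common spec of both programs)
def winCnt (times : List Int) (k s : Int) : Int :=
  ((times.countP (fun x => decide ((x - s) % 86400 ≤ k))) : Int)

-- max of winCnt over starts 0..m
def maxU (times : List Int) (k : Int) : Nat → Int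
  | 0 => winCnt times k 0
  | m+1 => max (maxU times k m) (winCnt times k ((m:Int)+1))

-- B's running best over the first m event indices: max(0, max_{i<m} (c i - i))
def bestR (c : Nat → Nat) : Nat → Int
  | 0 => 0
  | m+1 => max (bestR c m) ((c m : Int) - (m : Int))

-- B's running pointer
def jN (c : Nat → Nat) : Nat → Nat
  | 0 => 0
  | m+1 => max (jN c m) (c m)

-- ---------- § A-side: the counts array ----------

theorem pvAset_size (a : Array Int) (i v : Int) : (pvAset a i v).size = a.size := by
  unfold pvAset; split <;> simp

theorem pvAget_replicate (x : Int) (hx : 0 ≤ x) :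
    pvAget (Array.replicate 86400 (0:Int)) x = 0 := by
  unfold pvAget
  simp only [hx, if_pos, Array.getElem?_replicate]
  split <;> rfl

theorem pvAget_pvAset (a : Array Int) (t x v : Int)
    (ht : 0 ≤ t ∧ t < (a.size : Int)) (hx : 0 ≤ x) :
    pvAget (pvAset a t v) x = if x = t then v else pvAget a x := by
  unfold pvAget pvAset
  have h0t : (0:Int) ≤ t := ht.1
  have hlt : t.toNat < a.size := by omega
  simp only [h0t, hx, if_pos]
  by_cases hxt : x = t
  · subst hxt
    simp [hlt]
  · have hne : t.toNat ≠ x.toNat := by omega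
    simp [hne, hxt]

theorem pvAget_eq_mod (a : Array Int) (hsz : a.size = 86400) (t : Int)
    (ht : -86400 ≤ t ∧ t < 86400) :
    pvAget a t = pvAget a (PySem.Int.mod t 86400) := by
  have hm : PySem.Int.mod t 86400 = t % 86400 := PySem.Int.mod_eq_emod_of_pos (by norm_num)
  by_cases h0 : 0 ≤ t
  · have he : t % 86400 = t := Int.emod_eq_of_lt h0 (by omega)
    rw [hm, he]
  · have hneg : t % 86400 = t + 86400 := by omega
    rw [hm, hneg]
    unfold pvAget
    rw [if_neg h0, if_pos (by omega)]
    have hidx : (t + (a.size : Int)).toNat = (t + 86400).toNat := by omega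
    rw [hidx]

theorem pvAget_pvAset_mod (a : Array Int) (t x v : Int) (hsz : a.size = 86400)
    (ht : -86400 ≤ t ∧ t < 86400) (hx : 0 ≤ x) :
    pvAget (pvAset a t v) x = if x = PySem.Int.mod t 86400 then v else pvAget a x := by
  have hm : PySem.Int.mod t 86400 = t % 86400 := PySem.Int.mod_eq_emod_of_pos (by norm_num)
  by_cases h0 : 0 ≤ t
  · have he : PySem.Int.mod t 86400 = t := by rw [hm]; omega
    rw [he]
    exact pvAget_pvAset a t x v ⟨h0, by omega⟩ hx
  · have he : PySem.Int.mod t 86400 = t + 86400 := by rw [hm]; omega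
    rw [he]
    have hset : pvAset a t v = pvAset a (t + 86400) v := by
      unfold pvAset
      rw [if_neg h0, if_pos (by omega)]
      have hidx : (t + (a.size : Int)).toNat = (t + 86400).toNat := by omega
      rw [hidx]
    rw [hset]
    exact pvAget_pvAset a (t + 86400) x v ⟨by omega, by omega⟩ hx

theorem counts_foldl_get (l : List Int) (acc : Array Int) (x : Int)
    (hl : ∀ t ∈ l, -86400 ≤ t ∧ t < 86400) (hsz : acc.size = 86400) (hx : 0 ≤ x) :
    pvAget (l.foldl (fun c t => pvAset c t (pvAget c t + 1)) acc) x
      = pvAget acc x + ((l.map (fun t => PySem.Int.mod t 86400)).count x : Int) := by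
  induction l generalizing acc with
  | nil => simp
  | cons t l ih =>
      have ht := hl t (by simp)
      have hsz' : (pvAset acc t (pvAget acc t + 1)).size = 86400 := by
        rw [pvAset_size, hsz]
      simp only [List.foldl_cons, List.map_cons, List.count_cons]
      rw [ih _ (fun s hs => hl s (by simp [hs])) hsz']
      rw [pvAget_pvAset_mod acc t x _ hsz ht hx]
      by_cases hxt : x = PySem.Int.mod t 86400
      · rw [if_pos hxt]
        have hread : pvAget acc t = pvAget acc x := by
          rw [pvAget_eq_mod acc hsz t ht, ← hxt]
        have hbeq : (PySem.Int.mod t 86400 == x) = true := beq_iff_eq.mpr hxt.symm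
        rw [hread, hbeq]
        simp
        try omega
      · rw [if_neg hxt]
        have hbeq : (PySem.Int.mod t 86400 == x) = false :=
          beq_eq_false_iff_ne.mpr (fun h => hxt h.symm)
        rw [hbeq]
        simp

-- ---------- § the common spec: winCnt ----------

theorem winCnt_nonneg (times : List Int) (k s : Int) : 0 ≤ winCnt times k s := by
  unfold winCnt; positivity

theorem winCnt_step (times : List Int) (k t : Int)
    (hts : ∀ x ∈ times, 0 ≤ x ∧ x < 86400)
    (ht : 1 ≤ t ∧ t < 86400) (hk : 0 ≤ k ∧ k < 86400) :
    winCnt times k t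
      = winCnt times k (t-1) + (times.count ((t + k) % 86400) : Int)
          - (times.count (t-1) : Int) := by
  unfold winCnt
  induction times with
  | nil => simp
  | cons x l ih =>
      have hx := hts x (by simp)
      have ihl := ih (fun y hy => hts y (by simp [hy]))
      simp only [List.countP_cons, List.count_cons, beq_iff_eq, decide_eq_true_eq]
      push_cast
      split_ifs <;> push_cast at ihl ⊢ <;> omega

-- ---------- § A's main loop ----------

theorem A_loop_inv (times : List Int) (k : Int) (counts : Array Int)
    (hts : ∀ x ∈ times, 0 ≤ x ∧ x < 86400) (hk : 0 ≤ k ∧ k < 86400)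
    (hc : ∀ x : Int, 0 ≤ x → x < 86400 → pvAget counts x = (times.count x : Int)) :
    ∀ m : Nat, m ≤ 86399 →
      (PySem.List.pyRange 1 ((m:Int) + 1)).foldl
        (fun (st : Int × Int) t =>
          let s := st.2 + pvAget counts (PySem.Int.mod (t + k) 86400) - pvAget counts (t - 1)
          (if s > st.1 then s else st.1, s))
        (winCnt times k 0, winCnt times k 0)
      = (maxU times k m, winCnt times k (m:Int)) := by
  intro m
  induction m with
  | zero =>
      intro _
      rw [PySem.List.pyRange_one_eq_nil (by norm_num)]
      simp [maxU]
  | succ m ih =>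
      intro hm
      have hmle : m ≤ 86399 := by omega
      have h1 : (1:Int) ≤ (m:Int) + 1 := by omega
      have hcast : (((m+1 : Nat) : Int) + 1) = ((m:Int) + 1 + 1) := by push_cast; ring
      rw [hcast, PySem.List.pyRange_one_succ_right h1, List.foldl_append, ih hmle]
      simp only [List.foldl_cons, List.foldl_nil]
      have hmod : PySem.Int.mod ((m:Int) + 1 + k) 86400 = ((m:Int) + 1 + k) % 86400 :=
        PySem.Int.mod_eq_emod_of_pos (by norm_num)
      have hm1 : ((m:Int) + 1 - 1) = (m:Int) := by ring
      have hmodlo : 0 ≤ ((m:Int) + 1 + k) % 86400 := Int.emod_nonneg _ (by norm_num)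
      have hmodhi : ((m:Int) + 1 + k) % 86400 < 86400 := Int.emod_lt_of_pos _ (by norm_num)
      have hstep := winCnt_step times k ((m:Int)+1) hts (by constructor <;> omega) hk
      rw [hm1] at hstep
      have hsum : winCnt times k (m:Int)
            + pvAget counts (PySem.Int.mod ((m:Int) + 1 + k) 86400)
            - pvAget counts ((m:Int) + 1 - 1) = winCnt times k ((m:Int)+1) := by
        rw [hmod, hm1, hc _ hmodlo hmodhi,
            hc (m:Int) (by positivity) (by exact_mod_cast (by omega : m < 86400))]
        omega
      simp only [hsum]
      have : (if winCnt times k ((m:Int)+1) > maxU times k m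
              then winCnt times k ((m:Int)+1) else maxU times k m)
              = maxU times k (m+1) := by
        simp only [maxU]
        by_cases h : winCnt times k ((m:Int)+1) ≤ maxU times k m
        · rw [if_neg (by omega), max_eq_left h]
        · rw [if_pos (by omega), max_eq_right (by omega)]
      rw [this]
      norm_cast

theorem maxU_nonneg (times : List Int) (k : Int) (m : Nat) : 0 ≤ maxU times k m := by
  induction m with
  | zero => exact winCnt_nonneg ..
  | succ m ih => exact le_trans ih (le_max_left _ _)

theorem maxU_ge (times : List Int) (k : Int) (m s : Nat) (h : s ≤ m) :
    winCnt times k (s:Int) ≤ maxU times k m := by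
  induction m with
  | zero =>
      have hz : s = 0 := by omega
      subst hz; simp [maxU]
  | succ m ih =>
      rcases Nat.lt_or_ge s (m+1) with h' | h'
      · exact le_trans (ih (by omega)) (le_max_left _ _)
      · have hs : s = m + 1 := by omega
        subst hs
        have : ((m+1 : Nat) : Int) = (m:Int) + 1 := by push_cast; ring
        rw [this]
        exact le_max_right _ _

theorem maxU_attained (times : List Int) (k : Int) (m : Nat) :
    ∃ s : Nat, s ≤ m ∧ maxU times k m = winCnt times k (s:Int) := by
  induction m with
  | zero => exact ⟨0, le_refl _, by simp [maxU]⟩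
  | succ m ih =>
      rcases ih with ⟨s, hs, hval⟩
      by_cases h : winCnt times k ((m:Int)+1) ≤ maxU times k m
      · exact ⟨s, by omega, by simp only [maxU]; rw [max_eq_left h]; exact hval⟩
      · refine ⟨m+1, le_refl _, ?_⟩
        simp only [maxU]
        rw [max_eq_right (by omega)]
        norm_cast

-- ---------- § sorted positional facts ----------

theorem sorted_pred_iff (p : Int → Bool) (hp : ∀ x y : Int, x ≤ y → p y = true → p x = true) :
    ∀ (l : List Int), l.Pairwise (· ≤ ·) → ∀ (i : Nat) (h : i < l.length),
      (p l[i] = true ↔ i < l.countP p) := by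
  intro l
  induction l with
  | nil => intro _ i h; simp at h
  | cons a l ih =>
      intro hs i h
      have ha : ∀ b ∈ l, a ≤ b := (List.pairwise_cons.mp hs).1
      have hs' : l.Pairwise (· ≤ ·) := (List.pairwise_cons.mp hs).2
      match i with
      | 0 =>
          simp only [List.getElem_cons_zero, List.countP_cons]
          by_cases hpa : p a = true
          · simp [hpa]
          · have hz : l.countP p = 0 := List.countP_eq_zero.mpr
              (fun b hb hpb => hpa (hp a b (ha b hb) hpb))
            simp [hpa, hz]
      | i + 1 =>
          have hlen : i < l.length := by simpa using h
          simp only [List.getElem_cons_succ, List.countP_cons]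
          by_cases hpa : p a = true
          · rw [ih hs' i hlen]; simp [hpa]
          · have hz : l.countP p = 0 := List.countP_eq_zero.mpr
              (fun b hb hpb => hpa (hp a b (ha b hb) hpb))
            have hni : ¬ p l[i] = true := fun hpb =>
              hpa (hp a l[i] (ha _ (List.getElem_mem hlen)) hpb)
            simp [hpa, hz, hni]

-- downward-closedness of the two predicates we use
theorem dc_le (b : Int) : ∀ x y : Int, x ≤ y → decide (y ≤ b) = true → decide (x ≤ b) = true := by
  intro x y hxy hy
  simp only [decide_eq_true_eq] at *
  omega

theorem dc_lt (b : Int) : ∀ x y : Int, x ≤ y → decide (y < b) = true → decide (x < b) = true := by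
  intro x y hxy hy
  simp only [decide_eq_true_eq] at *
  omega

-- ---------- § bumpJ computes the two-pointer advance ----------

theorem bumpJ_eq (ext : List Int) (b : Int) (hs : ext.Pairwise (· ≤ ·)) :
    ∀ (fuel : Nat) (j : Nat), ext.length - j ≤ fuel → j ≤ ext.length →
      bumpJ ext b ext.length j = max j (ext.countP (fun x => decide (x ≤ b))) := by
  intro fuel
  induction fuel with
  | zero =>
      intro j hfuel hj
      have hj' : j = ext.length := by omega
      rw [bumpJ, dif_neg (by rintro ⟨h, _⟩; omega)]
      exact (Nat.max_eq_left (hj' ▸ List.countP_le_length)).symm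
  | succ fuel ih =>
      intro j hfuel hj
      by_cases hjlt : j < ext.length
      · have hget : PySem.List.pyGetD ext (j : Int) 0 = ext[j]'hjlt := by
          rw [PySem.List.pyGetD_natCast, List.getD_eq_getElem?_getD, List.getElem?_eq_getElem hjlt]
          rfl
        by_cases hcond : PySem.List.pyGetD ext (j : Int) 0 ≤ b
        · rw [bumpJ, dif_pos ⟨hjlt, hcond⟩, ih (j+1) (by omega) (by omega)]
          have hjc : j < ext.countP (fun x => decide (x ≤ b)) :=
            (sorted_pred_iff _ (dc_le b) ext hs j hjlt).mp
              (by rw [decide_eq_true_eq]; rw [hget] at hcond; exact hcond)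
          omega
        · rw [bumpJ, dif_neg (by rintro ⟨_, h⟩; exact hcond h)]
          have hcj : ext.countP (fun x => decide (x ≤ b)) ≤ j := by
            by_contra hlt
            have := (sorted_pred_iff _ (dc_le b) ext hs j hjlt).mpr (by omega)
            rw [decide_eq_true_eq] at this
            rw [hget] at hcond
            exact hcond this
          exact (Nat.max_eq_left hcj).symm
      · have hj' : j = ext.length := by omega
        rw [bumpJ, dif_neg (by rintro ⟨h, _⟩; omega)]
        exact (Nat.max_eq_left (hj' ▸ List.countP_le_length)).symm

-- ---------- § B's loop ----------

def extOf (ts : List Int) : List Int := ts ++ ts.map (fun t => t + 86400)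

def cIdx (ts : List Int) (k : Int) (i : Nat) : Nat :=
  (extOf ts).countP (fun x => decide (x ≤ ts.getD i 0 + k))

theorem extOf_sorted (ts : List Int) (hs : ts.Pairwise (· ≤ ·))
    (hb : ∀ x ∈ ts, 0 ≤ x ∧ x < 86400) : (extOf ts).Pairwise (· ≤ ·) := by
  unfold extOf
  rw [List.pairwise_append]
  refine ⟨hs, ?_, ?_⟩
  · rw [List.pairwise_map]
    exact hs.imp (by intro a b h; omega)
  · intro a ha b hb'
    rcases List.mem_map.mp hb' with ⟨c, hc, rfl⟩
    have h1 := (hb a ha).2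
    have h2 := (hb c hc).1
    omega

theorem extOf_length (ts : List Int) : (extOf ts).length = 2 * ts.length := by
  unfold extOf; simp; omega

theorem cIdx_le_length (ts : List Int) (k : Int) (i : Nat) :
    cIdx ts k i ≤ (extOf ts).length := List.countP_le_length

theorem cIdx_mono (ts : List Int) (k : Int) (hs : ts.Pairwise (· ≤ ·))
    (i i' : Nat) (h : i ≤ i') (h' : i' < ts.length) : cIdx ts k i ≤ cIdx ts k i' := by
  have hv : ts.getD i 0 ≤ ts.getD i' 0 := by
    have hi : i < ts.length := by omega
    rw [List.getD_eq_getElem?_getD, List.getElem?_eq_getElem hi,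
        List.getD_eq_getElem?_getD, List.getElem?_eq_getElem h']
    rcases Nat.eq_or_lt_of_le h with rfl | hlt
    · simp
    · exact List.pairwise_iff_getElem.mp hs i i' hi h' hlt
  exact List.countP_mono_left (by intro x _ hx; rw [decide_eq_true_eq] at *; omega)

theorem jN_le_cIdx (ts : List Int) (k : Int) (hs : ts.Pairwise (· ≤ ·)) :
    ∀ m, m < ts.length → jN (cIdx ts k) m ≤ cIdx ts k m := by
  intro m
  induction m with
  | zero => intro _; simp [jN]
  | succ m ih =>
      intro hm
      have h1 : jN (cIdx ts k) m ≤ cIdx ts k m := ih (by omega)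
      have h2 : cIdx ts k m ≤ cIdx ts k (m+1) := cIdx_mono ts k hs m (m+1) (by omega) hm
      simp only [jN]
      omega

theorem jN_le_length (ts : List Int) (k : Int) (m : Nat) :
    jN (cIdx ts k) m ≤ (extOf ts).length := by
  induction m with
  | zero => simp [jN]
  | succ m ih =>
      have := cIdx_le_length ts k m
      simp only [jN]
      omega

theorem B_loop_inv (ts : List Int) (k : Int) (hs : ts.Pairwise (· ≤ ·))
    (hb : ∀ x ∈ ts, 0 ≤ x ∧ x < 86400) :
    ∀ m : Nat, m ≤ ts.length →
      (List.range m).foldl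
        (fun (st : Int × Nat) (i : Nat) =>
          let j := bumpJ (ts ++ ts.map (fun t => t + 86400))
                     (PySem.List.pyGetD ts (i : Int) 0 + k) (2 * ts.length) st.2
          (if (j : Int) - (i : Int) > st.1 then (j : Int) - (i : Int) else st.1, j))
        (0, 0)
      = (bestR (cIdx ts k) m, jN (cIdx ts k) m) := by
  intro m
  induction m with
  | zero => intro _; simp [bestR, jN]
  | succ m ih =>
      intro hm
      have hmlt : m < ts.length := by omega
      rw [List.range_succ, List.foldl_append, ih (by omega)]
      simp only [List.foldl_cons, List.foldl_nil]
      have hget : PySem.List.pyGetD ts (m : Int) 0 = ts.getD m 0 := PySem.List.pyGetD_natCast ..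
      have hlen : 2 * ts.length = (extOf ts).length := (extOf_length ts).symm
      have hbump : bumpJ (ts ++ ts.map (fun t => t + 86400))
            (PySem.List.pyGetD ts (m : Int) 0 + k) (2 * ts.length) (jN (cIdx ts k) m)
            = cIdx ts k m := by
        rw [hget, hlen]
        have : (ts ++ ts.map (fun t => t + 86400)) = extOf ts := rfl
        rw [this, bumpJ_eq (extOf ts) _ (extOf_sorted ts hs hb) ((extOf ts).length)
              (jN (cIdx ts k) m) (by omega) (jN_le_length ts k m)]
        exact Nat.max_eq_right (jN_le_cIdx ts k hs m hmlt)
      rw [hbump]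
      have h1 : (if (cIdx ts k m : Int) - (m : Int) > bestR (cIdx ts k) m
                 then (cIdx ts k m : Int) - (m : Int) else bestR (cIdx ts k) m)
               = bestR (cIdx ts k) (m+1) := by
        simp only [bestR]
        by_cases h : ((cIdx ts k m : Int) - (m : Int)) ≤ bestR (cIdx ts k) m
        · rw [if_neg (by omega), max_eq_left h]
        · rw [if_pos (by omega), max_eq_right (by omega)]
      have h2 : cIdx ts k m = jN (cIdx ts k) (m+1) := by
        simp only [jN]
        exact (Nat.max_eq_right (jN_le_cIdx ts k hs m hmlt)).symm
      rw [← h1, ← h2]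

theorem bestR_nonneg (c : Nat → Nat) (m : Nat) : 0 ≤ bestR c m := by
  induction m with
  | zero => simp [bestR]
  | succ m ih => simp only [bestR]; omega

theorem bestR_ge (c : Nat → Nat) (m i : Nat) (h : i < m) :
    (c i : Int) - (i : Int) ≤ bestR c m := by
  induction m with
  | zero => omega
  | succ m ih =>
      by_cases h' : i < m
      · have := ih h'
        simp only [bestR]
        omega
      · have : i = m := by omega
        subst this
        simp only [bestR]
        omega

theorem bestR_le (c : Nat → Nat) (m : Nat) (X : Int) (hX : 0 ≤ X)
    (h : ∀ i, i < m → (c i : Int) - (i : Int) ≤ X) : bestR c m ≤ X := by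
  induction m with
  | zero => simpa [bestR]
  | succ m ih =>
      have h1 := ih (fun i hi => h i (by omega))
      have h2 := h m (by omega)
      simp only [bestR]
      omega


theorem countP_window_succ (l : List Int) (m : Nat) :
    l.countP (fun x => decide (0 ≤ x ∧ x < ((m+1 : Nat) : Int)))
      = l.countP (fun x => decide (0 ≤ x ∧ x < (m : Int))) + l.count ((m : Nat) : Int) := by
  induction l with
  | nil => simp
  | cons x l ih =>
      simp only [List.countP_cons, List.count_cons, beq_iff_eq, decide_eq_true_eq]
      rw [ih]
      push_cast
      split_ifs <;> omega

theorem sum_count_range (times : List Int) (m : Nat) :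
    ((List.range m).map (fun t : Nat => (times.count ((t : Nat) : Int) : Int))).sum
      = (times.countP (fun x => decide (0 ≤ x ∧ x < (m : Int))) : Int) := by
  induction m with
  | zero =>
      have h0 : times.countP (fun x => decide (0 ≤ x ∧ x < ((0:Nat) : Int))) = 0 :=
        List.countP_eq_zero.mpr (by intro a _; simp only [decide_eq_true_eq]; omega)
      rw [h0]
      simp
  | succ m ih =>
      rw [List.range_succ, List.map_append, List.sum_append, ih, countP_window_succ]
      push_cast
      simp
-- ---------- § bridge between the two characterisations ----------

theorem countP_le_split (l : List Int) (v k : Int) (hk : 0 ≤ k) :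
    l.countP (fun x => decide (x ≤ v + k))
      = l.countP (fun x => decide (x < v))
        + l.countP (fun x => decide (v ≤ x ∧ x ≤ v + k)) := by
  induction l with
  | nil => simp
  | cons x l ih =>
      simp only [List.countP_cons, decide_eq_true_eq]
      rw [ih]
      split_ifs <;> omega

theorem winCnt_split (times : List Int) (k v : Int)
    (hts : ∀ x ∈ times, 0 ≤ x ∧ x < 86400)
    (hk : 0 ≤ k ∧ k < 86400) (hv : 0 ≤ v ∧ v < 86400) :
    winCnt times k v
      = (times.countP (fun x => decide (v ≤ x ∧ x ≤ v + k)) : Int)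
        + (times.countP (fun x => decide (x ≤ v + k - 86400)) : Int) := by
  unfold winCnt
  induction times with
  | nil => simp
  | cons x l ih =>
      have hx := hts x (by simp)
      have ihl := ih (fun y hy => hts y (by simp [hy]))
      simp only [List.countP_cons, decide_eq_true_eq]
      push_cast at ihl ⊢
      split_ifs <;> omega

theorem cIdx_split (times ts : List Int) (k : Int) (hperm : ts.Perm times) (i : Nat) :
    (cIdx ts k i : Int)
      = (times.countP (fun x => decide (x ≤ ts.getD i 0 + k)) : Int)
        + (times.countP (fun x => decide (x ≤ ts.getD i 0 + k - 86400)) : Int) := by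
  unfold cIdx extOf
  rw [List.countP_append, List.countP_map]
  have h2 : (ts.countP ((fun x => decide (x ≤ ts.getD i 0 + k)) ∘ fun t => t + 86400))
      = ts.countP (fun x => decide (x ≤ ts.getD i 0 + k - 86400)) := by
    apply List.countP_congr
    intro x _
    simp only [Function.comp, decide_eq_true_eq]
    omega
  rw [h2, hperm.countP_eq, hperm.countP_eq]
  push_cast
  ring

theorem countP_lt_le_of_le_drop (ts : List Int) (i : Nat) (hi : i ≤ ts.length) (b : Int)
    (hdrop : ∀ y ∈ ts.drop i, b ≤ y) :
    ts.countP (fun x => decide (x < b)) ≤ i := by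
  conv_lhs => rw [← List.take_append_drop i ts]
  rw [List.countP_append]
  have h1 : (ts.take i).countP (fun x => decide (x < b)) ≤ i :=
    le_trans List.countP_le_length (by rw [List.length_take]; omega)
  have h2 : (ts.drop i).countP (fun x => decide (x < b)) = 0 := by
    apply List.countP_eq_zero.mpr
    intro y hy
    have := hdrop y hy
    simp only [decide_eq_true_eq]
    omega
  omega

theorem countP_lt_le_idx (ts : List Int) (hs : ts.Pairwise (· ≤ ·))
    (i : Nat) (hi : i < ts.length) (b : Int) (hb : ts[i]'hi = b) :
    ts.countP (fun x => decide (x < b)) ≤ i := by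
  apply countP_lt_le_of_le_drop ts i (by omega) b
  intro y hy
  rw [List.drop_eq_getElem_cons hi] at hy
  rcases List.mem_cons.mp hy with rfl | hy'
  · omega
  · have hp := hs.drop (i := i)
    rw [List.drop_eq_getElem_cons hi] at hp
    have := (List.pairwise_cons.mp hp).1 y hy'
    omega

theorem exists_min_img (g : Int → Int) :
    ∀ (l : List Int), l ≠ [] → ∃ v ∈ l, ∀ y ∈ l, g v ≤ g y := by
  intro l
  induction l with
  | nil => intro h; exact absurd rfl h
  | cons a l ih =>
      intro _
      rcases l.eq_nil_or_concat with rfl | hne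
      · exact ⟨a, by simp, by simp⟩
      · have hlne : l ≠ [] := by rcases hne with ⟨_, _, rfl⟩; simp
        rcases ih hlne with ⟨v, hv, hmin⟩
        by_cases hc : g a ≤ g v
        · refine ⟨a, by simp, ?_⟩
          intro y hy
          rcases List.mem_cons.mp hy with rfl | hy'
          · exact le_refl _
          · exact le_trans hc (hmin y hy')
        · refine ⟨v, by simp [hv], ?_⟩
          intro y hy
          rcases List.mem_cons.mp hy with rfl | hy'
          · omega
          · exact hmin y hy'

theorem firstOcc (ts : List Int) (hs : ts.Pairwise (· ≤ ·)) (v : Int) (hv : v ∈ ts) :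
    ts.countP (fun x => decide (x < v)) < ts.length ∧
      ts.getD (ts.countP (fun x => decide (x < v))) 0 = v := by
  obtain ⟨m, hm, hvm⟩ := List.mem_iff_getElem.mp hv
  obtain ⟨i, hIdef⟩ : ∃ i, ts.countP (fun x => decide (x < v)) = i := ⟨_, rfl⟩
  rw [hIdef]
  have him : i ≤ m := by
    by_contra h
    have := (sorted_pred_iff (fun x => decide (x < v)) (dc_lt v) ts hs m hm).mpr (by omega)
    rw [hvm, decide_eq_true_eq] at this
    omega
  have hi : i < ts.length := by omega
  have h1 : ¬ (ts[i]'hi < v) := by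
    intro hlt
    have := (sorted_pred_iff (fun x => decide (x < v)) (dc_lt v) ts hs i hi).mp
      (by simpa using hlt)
    omega
  have h2 : ts[i]'hi ≤ v := by
    rcases Nat.eq_or_lt_of_le him with heq | hlt
    · subst heq
      omega
    · rw [← hvm]
      exact List.pairwise_iff_getElem.mp hs i m hi hm hlt
  refine ⟨hi, ?_⟩
  rw [List.getD_eq_getElem?_getD, List.getElem?_eq_getElem hi]
  simp only [Option.getD_some]
  omega

theorem cIdx_sub_le_winCnt (times ts : List Int) (k : Int)
    (hperm : ts.Perm times) (hs : ts.Pairwise (· ≤ ·))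
    (hts : ∀ x ∈ times, 0 ≤ x ∧ x < 86400) (hk : 0 ≤ k ∧ k < 86400)
    (i : Nat) (hi : i < ts.length) :
    (cIdx ts k i : Int) - (i : Int) ≤ winCnt times k (ts.getD i 0) := by
  have hgd : ts.getD i 0 = ts[i]'hi := by
    rw [List.getD_eq_getElem?_getD, List.getElem?_eq_getElem hi]; rfl
  have hvmem : ts.getD i 0 ∈ times := by
    rw [hgd]; exact hperm.mem_iff.mp (List.getElem_mem hi)
  have hv := hts _ hvmem
  rw [cIdx_split times ts k hperm i,
      countP_le_split times (ts.getD i 0) k hk.1,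
      winCnt_split times k (ts.getD i 0) hts hk hv]
  have hlt : times.countP (fun x => decide (x < ts.getD i 0)) ≤ i := by
    rw [← hperm.countP_eq]
    exact countP_lt_le_idx ts hs i hi _ hgd.symm
  push_cast
  omega

theorem winCnt_le_bestR (times ts : List Int) (k : Int)
    (hperm : ts.Perm times) (hs : ts.Pairwise (· ≤ ·))
    (hts : ∀ x ∈ times, 0 ≤ x ∧ x < 86400) (hk : 0 ≤ k ∧ k < 86400)
    (s : Int) (_hsr : 0 ≤ s ∧ s < 86400) :
    winCnt times k s ≤ bestR (cIdx ts k) ts.length := by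
  by_cases hz : times.countP (fun x => decide ((x - s) % 86400 ≤ k)) = 0
  · unfold winCnt
    rw [hz]
    exact bestR_nonneg ..
  · have hfn : times.filter (fun x => decide ((x - s) % 86400 ≤ k)) ≠ [] := by
      intro h
      rw [List.countP_eq_length_filter, h] at hz
      exact hz rfl
    obtain ⟨v, hvf, hmin⟩ := exists_min_img (fun x => (x - s) % 86400) _ hfn
    have hvmem : v ∈ times := (List.mem_filter.mp hvf).1
    have hvwin : (v - s) % 86400 ≤ k := by
      have := (List.mem_filter.mp hvf).2
      simpa using this
    have hvb := hts v hvmem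
    have hvts : v ∈ ts := hperm.mem_iff.mpr hvmem
    obtain ⟨hi, hgd⟩ := firstOcc ts hs v hvts
    have hmono : winCnt times k s ≤ winCnt times k v := by
      unfold winCnt
      have : times.countP (fun x => decide ((x - s) % 86400 ≤ k))
          ≤ times.countP (fun x => decide ((x - v) % 86400 ≤ k)) := by
        apply List.countP_mono_left
        intro x hx hpx
        rw [decide_eq_true_eq] at *
        have hxb := hts x hx
        have hminx : (v - s) % 86400 ≤ (x - s) % 86400 :=
          hmin x (List.mem_filter.mpr ⟨hx, by simpa using hpx⟩)
        omega
      exact_mod_cast this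
    have heq : (cIdx ts k (ts.countP (fun x => decide (x < v))) : Int)
        - (ts.countP (fun x => decide (x < v)) : Int) = winCnt times k v := by
      rw [cIdx_split times ts k hperm, hgd,
          countP_le_split times v k hk.1,
          winCnt_split times k v hts hk hvb]
      have hcnt : times.countP (fun x => decide (x < v)) = ts.countP (fun x => decide (x < v)) :=
        (hperm.countP_eq _).symm
      push_cast
      omega
    have hge := bestR_ge (cIdx ts k) ts.length _ hi
    omega

-- ---------- § the two programs compute maxU / bestR ----------

theorem A_eq (times : List Int) (k : Int)
    (hts : ∀ t ∈ times, -86400 ≤ t ∧ t < 86400) (hk : 0 ≤ k ∧ k < 86400) :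
    solve times k
      = maxU (times.map (fun t => PySem.Int.mod t 86400)) k 86399 := by
  have hT : ∀ x ∈ times.map (fun t => PySem.Int.mod t 86400), 0 ≤ x ∧ x < 86400 := by
    intro x hx
    rcases List.mem_map.mp hx with ⟨t, _, rfl⟩
    rw [PySem.Int.mod_eq_emod_of_pos (by norm_num)]
    constructor
    · exact Int.emod_nonneg _ (by norm_num)
    · exact Int.emod_lt_of_pos _ (by norm_num)
  have hc : ∀ x : Int, 0 ≤ x → x < 86400 →
      pvAget (countsA times) x
        = ((times.map (fun t => PySem.Int.mod t 86400)).count x : Int) := by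
    intro x hx0 _
    unfold countsA
    rw [counts_foldl_get times _ x hts (by simp) hx0, pvAget_replicate x hx0]
    ring
  have hs0 : initSumA (countsA times) k
      = winCnt (times.map (fun t => PySem.Int.mod t 86400)) k 0 := by
    unfold initSumA
    rw [PySem.List.foldl_add]
    have hn : (((k+1).toNat : Nat) : Int) = k + 1 := by omega
    rw [← hn, PySem.List.pyRange_zero_natCast, List.map_map]
    have hmap : (List.range (k+1).toNat).map
          ((fun t => pvAget (countsA times) t) ∘ (fun n : Nat => (n : Int)))
        = (List.range (k+1).toNat).map
            (fun t : Nat => (((times.map (fun t => PySem.Int.mod t 86400)).count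
              ((t : Nat) : Int)) : Int)) := by
      apply List.map_congr_left
      intro t htr
      have htlt : t < (k+1).toNat := List.mem_range.mp htr
      exact hc (t : Int) (by positivity) (by omega)
    rw [hmap, sum_count_range (times.map (fun t => PySem.Int.mod t 86400)) ((k+1).toNat),
        zero_add]
    unfold winCnt
    congr 1
    apply List.countP_congr
    intro x hx
    have hxb := hT x hx
    simp only [decide_eq_true_eq]
    rw [Int.emod_eq_of_lt (by omega) (by omega)]
    omega
  have hml : mainLoopA (countsA times) k
        (winCnt (times.map (fun t => PySem.Int.mod t 86400)) k 0)
      = (maxU (times.map (fun t => PySem.Int.mod t 86400)) k 86399,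
         winCnt (times.map (fun t => PySem.Int.mod t 86400)) k ((86399 : Nat) : Int)) := by
    unfold mainLoopA
    have := A_loop_inv (times.map (fun t => PySem.Int.mod t 86400)) k (countsA times)
      hT hk hc 86399 (by omega)
    have hrange : ((86399 : Nat) : Int) + 1 = (86400 : Int) := by norm_num
    rw [hrange] at this
    exact this
  unfold solve
  rw [hs0, hml]

theorem B_eq (times : List Int) (k : Int)
    (hts : ∀ t ∈ times, -86400 ≤ t ∧ t < 86400) :
    solve_alt times k
      = bestR
          (cIdx (PySem.List.sorted (times.map (fun t => PySem.Int.mod t 86400))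
            (fun x => x) false) k)
          (PySem.List.sorted (times.map (fun t => PySem.Int.mod t 86400))
            (fun x => x) false).length := by
  have hT : ∀ x ∈ times.map (fun t => PySem.Int.mod t 86400), 0 ≤ x ∧ x < 86400 := by
    intro x hx
    rcases List.mem_map.mp hx with ⟨t, _, rfl⟩
    rw [PySem.Int.mod_eq_emod_of_pos (by norm_num)]
    constructor
    · exact Int.emod_nonneg _ (by norm_num)
    · exact Int.emod_lt_of_pos _ (by norm_num)
  simp only [solve_alt]
  have hs : (PySem.List.sorted (times.map (fun t => PySem.Int.mod t 86400))
      (fun x => x) false).Pairwise (· ≤ ·) :=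
    PySem.List.sorted_pairwise _ (fun x => x)
  have hb : ∀ x ∈ PySem.List.sorted (times.map (fun t => PySem.Int.mod t 86400))
      (fun x => x) false, 0 ≤ x ∧ x < 86400 := by
    intro x hx
    exact hT x ((PySem.List.sorted_perm _ (fun x => x) false).mem_iff.mp hx)
  have := B_loop_inv (PySem.List.sorted (times.map (fun t => PySem.Int.mod t 86400))
      (fun x => x) false) k hs hb
    (PySem.List.sorted (times.map (fun t => PySem.Int.mod t 86400)) (fun x => x) false).length
    (le_refl _)
  rw [congrArg Prod.fst this]

theorem solve_spec : Claim_equal_solve := by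
  intro times k _hdom hpre
  unfold Spec_solve
  obtain ⟨hts, hk0, hk1⟩ := hpre
  have hk : 0 ≤ k ∧ k < 86400 := ⟨hk0, hk1⟩
  have hT : ∀ x ∈ times.map (fun t => PySem.Int.mod t 86400), 0 ≤ x ∧ x < 86400 := by
    intro x hx
    rcases List.mem_map.mp hx with ⟨t, _, rfl⟩
    rw [PySem.Int.mod_eq_emod_of_pos (by norm_num)]
    constructor
    · exact Int.emod_nonneg _ (by norm_num)
    · exact Int.emod_lt_of_pos _ (by norm_num)
  have hperm : (PySem.List.sorted (times.map (fun t => PySem.Int.mod t 86400))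
      (fun x => x) false).Perm (times.map (fun t => PySem.Int.mod t 86400)) :=
    PySem.List.sorted_perm _ (fun x => x) false
  have hs : (PySem.List.sorted (times.map (fun t => PySem.Int.mod t 86400))
      (fun x => x) false).Pairwise (· ≤ ·) :=
    PySem.List.sorted_pairwise _ (fun x => x)
  rw [A_eq times k hts hk, B_eq times k hts]
  apply le_antisymm
  · obtain ⟨s, hs86, heq⟩ := maxU_attained (times.map (fun t => PySem.Int.mod t 86400)) k 86399
    rw [heq]
    exact winCnt_le_bestR (times.map (fun t => PySem.Int.mod t 86400)) _ k hperm hs hT hk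
      (s : Int) (by constructor <;> omega)
  · apply bestR_le _ _ _ (maxU_nonneg (times.map (fun t => PySem.Int.mod t 86400)) k 86399)
    intro i hi
    calc (cIdx (PySem.List.sorted (times.map (fun t => PySem.Int.mod t 86400))
            (fun x => x) false) k i : Int) - (i : Int)
        ≤ winCnt (times.map (fun t => PySem.Int.mod t 86400)) k
            ((PySem.List.sorted (times.map (fun t => PySem.Int.mod t 86400))
              (fun x => x) false).getD i 0) :=
          cIdx_sub_le_winCnt (times.map (fun t => PySem.Int.mod t 86400)) _ k hperm hs hT hk i hi
      _ ≤ maxU (times.map (fun t => PySem.Int.mod t 86400)) k 86399 := by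
          have hvmem : (PySem.List.sorted (times.map (fun t => PySem.Int.mod t 86400))
              (fun x => x) false).getD i 0 ∈ times.map (fun t => PySem.Int.mod t 86400) := by
            have hgd : (PySem.List.sorted (times.map (fun t => PySem.Int.mod t 86400))
                (fun x => x) false).getD i 0
                = (PySem.List.sorted (times.map (fun t => PySem.Int.mod t 86400))
                    (fun x => x) false)[i]'hi := by
              rw [List.getD_eq_getElem?_getD, List.getElem?_eq_getElem hi]; rfl
            rw [hgd]
            exact hperm.mem_iff.mp (List.getElem_mem hi)
          have hvb := hT _ hvmem
          have hcast : (((((PySem.List.sorted (times.map (fun t => PySem.Int.mod t 86400))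
                (fun x => x) false).getD i 0).toNat : Nat)) : Int)
              = (PySem.List.sorted (times.map (fun t => PySem.Int.mod t 86400))
                  (fun x => x) false).getD i 0 := by omega
          have := maxU_ge (times.map (fun t => PySem.Int.mod t 86400)) k 86399
            ((PySem.List.sorted (times.map (fun t => PySem.Int.mod t 86400))
              (fun x => x) false).getD i 0).toNat (by omega)
          rw [hcast] at this
          exact this
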